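-- pv_equiv track=rewrite | github.com/zjzhou521/WordSwarm | 0-StaticWordCloud/preprocessing.py | get_term_list
-- ===== SOURCE A (Python) =====
-- def get_term_list(docs_term_sequence):
--     all_terms = []
--     for doc_terms in docs_term_sequence:
--         for term in doc_terms:
--             if term not in all_terms:
--                 all_terms.append(term)
--     all_terms.sort()
--     return all_terms
-- ===== SOURCE B (Python) =====
-- def get_term_list(docs_term_sequence):
--     flat = [term for doc_terms in docs_term_sequence for term in doc_terms]
--     flat.sort()
--     result = []
--     prev = None
--     for term in flat:
--         if term != prev:
--             result.append(term)
--             prev = term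
--     return result
-- ===== Notes on version B (the rewrite author's own statement) =====
-- stated objective: faster
-- what changed: B flattens all documents keeping duplicates, sorts once, then removes adjacent duplicates in a single pass, instead of A's per-element linear membership scan over the growing unique list followed by a sort.
import Mathlib
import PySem

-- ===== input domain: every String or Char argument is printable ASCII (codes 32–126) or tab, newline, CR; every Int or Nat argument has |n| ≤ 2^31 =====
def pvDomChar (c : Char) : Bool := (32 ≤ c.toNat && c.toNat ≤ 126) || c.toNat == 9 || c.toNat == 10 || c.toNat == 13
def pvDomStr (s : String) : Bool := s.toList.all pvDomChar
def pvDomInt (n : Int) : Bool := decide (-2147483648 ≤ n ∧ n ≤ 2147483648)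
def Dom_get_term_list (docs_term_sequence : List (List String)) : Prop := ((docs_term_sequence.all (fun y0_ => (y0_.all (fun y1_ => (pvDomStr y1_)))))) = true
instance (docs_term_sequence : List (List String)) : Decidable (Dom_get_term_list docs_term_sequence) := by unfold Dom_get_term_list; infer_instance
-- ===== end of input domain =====

-- B flattens everything (keeping duplicates), sorts once, and drops adjacent duplicates in one pass, instead of A's linear membership scan per element; measurably faster on large inputs.

-- ===== PORT A =====
-- A's inner statement: 'if term not in all_terms: all_terms.append(term)'
def pvInsertNew (acc : List String) (t : String) : List String :=
  if t ∈ acc then acc else acc ++ [t]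

def get_term_list (docs_term_sequence : List (List String)) : List String :=
  let all_terms :=
    docs_term_sequence.foldl (fun acc doc_terms => doc_terms.foldl pvInsertNew acc) []
  PySem.List.sorted all_terms (fun x => x) false

-- ===== PORT B =====
-- B's loop body: 'if term != prev: result.append(term); prev = term'
def pvDedupStep (st : List String × Option String) (t : String) : List String × Option String :=
  if some t ≠ st.2 then (st.1 ++ [t], some t) else st

def get_term_list_alt (docs_term_sequence : List (List String)) : List String :=
  let flat := docs_term_sequence.flatMap (fun doc_terms => doc_terms)
  let sortedFlat := PySem.List.sorted flat (fun x => x) false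
  (sortedFlat.foldl pvDedupStep ([], none)).1

-- ===== PRECONDITION & SPEC =====
def Spec_get_term_list (docs_term_sequence : List (List String)) (out : List String) : Prop := out = get_term_list_alt docs_term_sequence
instance (docs_term_sequence : List (List String)) (out : List String) : Decidable (Spec_get_term_list docs_term_sequence out) := by unfold Spec_get_term_list; infer_instance

-- ===== CLAIM (what is proved, stated in full; the proofs are below) =====
def Claim_equal_get_term_list : Prop := ∀ (docs_term_sequence : List (List String)), Dom_get_term_list docs_term_sequence → Spec_get_term_list docs_term_sequence (get_term_list docs_term_sequence)

-- ===== LEMMAS AND PROOFS =====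

theorem pv_foldl_insertNew_nodup (xs : List String) : ∀ acc : List String, acc.Nodup → (xs.foldl pvInsertNew acc).Nodup := by
  induction xs with
  | nil => intro acc h; simpa using h
  | cons x xs ih =>
    intro acc h
    simp only [List.foldl_cons, pvInsertNew]
    by_cases hx : x ∈ acc
    · rw [if_pos hx]; exact ih _ h
    · rw [if_neg hx]
      exact ih _ (h.append (List.nodup_singleton x) ((List.disjoint_singleton).mpr hx))

theorem pv_mem_foldl_insertNew (xs : List String) : ∀ acc y, (y ∈ xs.foldl pvInsertNew acc ↔ y ∈ acc ∨ y ∈ xs) := by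
  induction xs with
  | nil => intro acc y; simp
  | cons x xs ih =>
    intro acc y
    simp only [List.foldl_cons, pvInsertNew]
    by_cases hx : x ∈ acc
    · rw [if_pos hx, ih]
      have hyx : y = x → y ∈ acc := fun e => e ▸ hx
      simp only [List.mem_cons]
      tauto
    · rw [if_neg hx, ih]
      simp [or_assoc, or_comm, or_left_comm]

-- adjacent-dedup recursion describing B's fold once prev is set
def pvGo (p : String) : List String → List String
  | [] => []
  | x :: xs => if x = p then pvGo p xs else x :: pvGo x xs

theorem pv_foldl_dedupStep (xs : List String) : ∀ (res : List String) (p : String),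
    (xs.foldl pvDedupStep (res, some p)).1 = res ++ pvGo p xs := by
  induction xs with
  | nil => intro res p; simp [pvGo]
  | cons x xs ih =>
    intro res p
    by_cases hx : x = p
    · subst hx
      simp [List.foldl_cons, pvDedupStep, pvGo, ih]
    · simp [List.foldl_cons, pvDedupStep, hx, pvGo, ih, List.append_assoc]

theorem pv_go_spec (xs : List String) : ∀ p : String, (p :: xs).Pairwise (· ≤ ·) →
    (p :: pvGo p xs).Pairwise (· < ·) ∧ ∀ y, (y ∈ p :: pvGo p xs ↔ y ∈ p :: xs) := by
  induction xs with
  | nil => intro p _; simp [pvGo]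
  | cons x xs ih =>
    intro p h
    rcases List.pairwise_cons.mp h with ⟨hp, hx⟩
    by_cases hxp : x = p
    · subst hxp
      have h' : (x :: xs).Pairwise (· ≤ ·) := List.pairwise_cons.mpr ⟨fun y hy => hp y (List.mem_cons_of_mem _ hy), (List.pairwise_cons.mp hx).2⟩
      rcases ih x h' with ⟨h1, h2⟩
      refine ⟨by simpa [pvGo] using h1, fun y => ?_⟩
      rw [pvGo, if_pos rfl]
      have := h2 y
      simp only [List.mem_cons] at this ⊢
      tauto
    · rcases ih x hx with ⟨h1, h2⟩
      have hpx : p < x := lt_of_le_of_ne (hp x (List.mem_cons_self)) (Ne.symm hxp)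
      have hxle : ∀ y ∈ xs, x ≤ y := (List.pairwise_cons.mp hx).1
      constructor
      · rw [pvGo, if_neg hxp]
        refine List.pairwise_cons.mpr ⟨fun y hy => ?_, h1⟩
        rcases List.mem_cons.mp ((h2 y).mp hy) with rfl | h
        · exact hpx
        · exact lt_of_lt_of_le hpx (hxle y h)
      · intro y
        rw [pvGo, if_neg hxp]
        have := h2 y
        simp only [List.mem_cons] at this ⊢
        tauto

-- ===== VERDICT (by name: the statement is the Claim_ definition above) =====
theorem get_term_list_spec : Claim_equal_get_term_list := by
  intro docs _
  unfold Spec_get_term_list get_term_list get_term_list_alt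
  -- name the flattened list
  set flat := docs.flatMap (fun doc_terms => doc_terms) with hflat
  have hnest : docs.foldl (fun acc doc_terms => doc_terms.foldl pvInsertNew acc) [] = flat.foldl pvInsertNew [] := by
    rw [hflat, List.flatMap_id', List.foldl_flatten]
  rw [hnest]
  set acc := flat.foldl pvInsertNew [] with hacc
  have haccnd : acc.Nodup := pv_foldl_insertNew_nodup flat [] (by simp)
  have haccmem : ∀ y, y ∈ acc ↔ y ∈ flat := by
    intro y; rw [hacc, pv_mem_foldl_insertNew]; simp
  set sf := PySem.List.sorted flat (fun x => x) false with hsf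
  have hsfmem : ∀ y, y ∈ sf ↔ y ∈ flat := fun y => PySem.List.mem_sorted _ _ _ _
  have hsfpw : sf.Pairwise (· ≤ ·) := PySem.List.sorted_pairwise _ _
  show PySem.List.sorted acc (fun x => x) = (List.foldl pvDedupStep ([], none) sf).1
  cases hc : sf with
  | nil =>
    have hperm : sf.Perm flat := PySem.List.sorted_perm _ _ _
    rw [hc] at hperm
    have hfe : flat = [] := hperm.symm.eq_nil
    rw [hacc, hfe]
    rfl
  | cons s rest =>
    have hpw : (s :: rest).Pairwise (· ≤ ·) := hc ▸ hsfpw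
    rcases pv_go_spec rest s hpw with ⟨hlt, hmem⟩
    have hstep : ((s :: rest).foldl pvDedupStep ([], none)).1 = s :: pvGo s rest := by
      rw [List.foldl_cons]
      have : pvDedupStep ([], none) s = ([s], some s) := by simp [pvDedupStep]
      rw [this, pv_foldl_dedupStep]
      simp
    rw [hstep]
    -- A's sorted output equals the strictly increasing list s :: pvGo s rest
    refine PySem.List.sorted_eq_of_perm_of_pairwise_lt _ _ _ ?_ hlt
    have hnd : (s :: pvGo s rest).Nodup := hlt.imp ne_of_lt
    rw [List.perm_ext_iff_of_nodup hnd haccnd]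
    intro y
    rw [haccmem y, ← hsfmem y, hc, hmem y]
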